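-- pv_equiv track=rewrite | github.com/JonghyunLEE12/SWEA | 프로그래머스/unrated/135808. 과일 장수/과일 장수.py | solution
-- ===== SOURCE A (Python) =====
-- def solution(k, m, score):
--     answer = 0
--
--     box = []
--     rlt = []
--
--     score.sort(reverse = True)
--
--     def cal(box):
--         min_num = min(box)
--         rlt.append(min_num*len(box))
--
--     for apple in score:
--         if len(box) == m:
--             cal(box)
--             box = [apple]
--         else:
--             box.append(apple)
--
--     if len(box) == m:
--         cal(box)
--
--     answer = sum(rlt)
--     return answer
-- ===== SOURCE B (Python) =====
-- def solution(k, m, score):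
--     # Sorts `score` in place (descending), like the original.
--     score.sort(reverse=True)
--     if m <= 0:
--         return 0  # no complete box has a non-positive size
--     return m * sum(score[i] for i in range(m - 1, len(score), m))
-- ===== Notes on version B (the rewrite author's own statement) =====
-- stated objective: simpler
-- what changed: Instead of accumulating boxes in a list and calling min() on each full box, B sorts descending and sums one representative per complete box directly, the element at index m-1, 2m-1, ... (the minimum of each full box of a descending list is its last element), multiplying the sum by m; non-positive m yields 0 complete boxes.
import Mathlib
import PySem

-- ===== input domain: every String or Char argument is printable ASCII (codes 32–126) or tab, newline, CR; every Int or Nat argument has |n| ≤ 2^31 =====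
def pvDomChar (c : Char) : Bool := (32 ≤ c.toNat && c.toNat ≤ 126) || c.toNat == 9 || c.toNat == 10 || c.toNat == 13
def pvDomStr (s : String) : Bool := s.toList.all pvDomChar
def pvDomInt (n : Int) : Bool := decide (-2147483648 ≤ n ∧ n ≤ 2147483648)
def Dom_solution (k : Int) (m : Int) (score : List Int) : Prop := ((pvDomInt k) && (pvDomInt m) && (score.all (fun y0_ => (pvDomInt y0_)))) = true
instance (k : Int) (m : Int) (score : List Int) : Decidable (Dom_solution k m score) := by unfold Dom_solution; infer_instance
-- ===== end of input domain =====

-- B replaces A's box-list building and per-box min() calls by a single strided sum over the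
-- descending-sorted list (simpler); both Pythons sort `score` in place — the theorems are about
-- the RETURN value (the mutation is identical in A and B).

-- ===== PORT A =====
-- cal(box): rlt.append(min(box) * len(box)).  Python's min([]) raises ValueError; the port
-- returns the .getD default there — that happens only when m = 0, which Pre_solution excludes.
def solutionCal (box : List Int) (rlt : List Int) : List Int :=
  rlt ++ [((PySem.List.min? box (fun x => x)).getD 0) * (box.length : Int)]

-- body of 'for apple in score'; state = (box, rlt)
def solutionStep (m : Int) (st : List Int × List Int) (apple : Int) : List Int × List Int :=
  if (st.1.length : Int) = m then ([apple], solutionCal st.1 st.2)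
  else (st.1 ++ [apple], st.2)

def solution (k : Int) (m : Int) (score : List Int) : Int :=
  let sortedScore := PySem.List.sorted score (fun x => x) true
  let st := sortedScore.foldl (solutionStep m) ([], [])
  let rlt := if (st.1.length : Int) = m then solutionCal st.1 st.2 else st.2
  rlt.sum

-- ===== PORT B =====
def solution_alt (k : Int) (m : Int) (score : List Int) : Int :=
  let s := PySem.List.sorted score (fun x => x) true
  if m ≤ 0 then 0
  else m * ((PySem.List.pyRange (m - 1) (s.length : Int) m).map (fun i => PySem.List.pyGetD s i 0)).sum

-- ===== PRECONDITION & SPEC =====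
-- Pre_ excludes exactly m = 0, where Python A raises ValueError (min of the empty first box).
def Pre_solution (k : Int) (m : Int) (score : List Int) : Prop := m ≠ 0
instance (k : Int) (m : Int) (score : List Int) : Decidable (Pre_solution k m score) := by unfold Pre_solution; infer_instance

def pvWitness_solution : Int × Int × List Int := (0, 2, [1, 2, 3, 1])

def Spec_solution (k : Int) (m : Int) (score : List Int) (out : Int) : Prop := out = solution_alt k m score
instance (k : Int) (m : Int) (score : List Int) (out : Int) : Decidable (Spec_solution k m score out) := by unfold Spec_solution; infer_instance

-- ===== CLAIM (what is proved, stated in full; the proofs are below) =====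
def Claim_equal_solution : Prop := ∀ (k : Int) (m : Int) (score : List Int), Dom_solution k m score → Pre_solution k m score → Spec_solution k m score (solution k m score)

-- ===== LEMMAS AND PROOFS =====

-- While the box is not yet full, the loop only appends to the box.
lemma solution_fill (m : Int) (l : List Int) : ∀ (box rlt : List Int),
    (box.length : Int) + l.length ≤ m →
    l.foldl (solutionStep m) (box, rlt) = (box ++ l, rlt) := by
  induction l with
  | nil => intro box rlt _; simp
  | cons a t ih =>
    intro box rlt h
    simp only [List.length_cons] at h
    push_cast at h
    have hne : ((box.length : Int)) ≠ m := by omega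
    simp only [List.foldl_cons, solutionStep, if_neg hne]
    rw [ih (box ++ [a]) rlt (by simp; push_cast; omega)]
    simp

-- For negative m the box never reaches length m.
lemma solution_negfill (m : Int) (hm : m < 0) (l : List Int) : ∀ (box rlt : List Int),
    l.foldl (solutionStep m) (box, rlt) = (box ++ l, rlt) := by
  induction l with
  | nil => intro box rlt; simp
  | cons a t ih =>
    intro box rlt
    have hne : ((box.length : Int)) ≠ m := by omega
    simp only [List.foldl_cons, solutionStep, if_neg hne]
    rw [ih (box ++ [a]) rlt]
    simp

lemma pyRange_pos_nil (a b s : Int) (hs : 0 < s) (h : b ≤ a) :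
    PySem.List.pyRange a b s = [] := by
  rw [PySem.List.pyRange_of_pos a b hs]
  simp [show ¬ a < b by omega]

lemma pyRange_pos_cons (a b s : Int) (hs : 0 < s) (h : a < b) :
    PySem.List.pyRange a b s = a :: PySem.List.pyRange (a + s) b s := by
  rw [PySem.List.pyRange_of_pos a b hs, PySem.List.pyRange_of_pos (a + s) b hs, if_pos h]
  by_cases h2 : a + s < b
  · rw [if_pos h2]
    have e1 : (b - a + s - 1) / s = (b - (a + s) + s - 1) / s + 1 := by
      rw [show b - a + s - 1 = (b - (a + s) + s - 1) + 1 * s by ring,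
        Int.add_mul_ediv_right _ _ (by omega : s ≠ 0)]
    have hnn : 0 ≤ (b - (a + s) + s - 1) / s := Int.ediv_nonneg (by omega) (by omega)
    rw [e1, show ((b - (a + s) + s - 1) / s + 1).toNat = ((b - (a + s) + s - 1) / s).toNat + 1 by omega]
    rw [List.range_succ_eq_map, List.map_cons, List.map_map]
    refine List.cons_eq_cons.mpr ⟨by simp, ?_⟩
    apply List.map_congr_left
    intro kk _
    simp only [Function.comp_apply, Nat.succ_eq_add_one]
    push_cast
    ring
  · rw [if_neg h2]
    have e1 : (b - a + s - 1) / s = 1 := by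
      rw [← PySem.Int.floordiv_eq_ediv_of_pos hs, PySem.Int.floordiv_eq_iff_of_pos hs]
      constructor <;> nlinarith
    rw [e1]
    norm_num

lemma pyRange_pos_shift (a b s : Int) (hs : 0 < s) :
    PySem.List.pyRange (a + s) b s = (PySem.List.pyRange a (b - s) s).map (· + s) := by
  rw [PySem.List.pyRange_of_pos _ _ hs, PySem.List.pyRange_of_pos _ _ hs, List.map_map]
  have hc : (if a + s < b then ((b - (a + s) + s - 1) / s).toNat else 0)
      = (if a < b - s then ((b - s - a + s - 1) / s).toNat else 0) := by
    have e : b - (a + s) + s - 1 = b - s - a + s - 1 := by ring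
    rw [e]
    by_cases h2 : a + s < b
    · rw [if_pos h2, if_pos (by omega)]
    · rw [if_neg h2, if_neg (by omega)]
  rw [hc]
  apply List.map_congr_left
  intro k _
  simp only [Function.comp_apply]
  ring

-- (l.drop M).getD j 0 = l.getD (M + j) 0
lemma getD_drop_zero (l : List Int) (M j : Nat) :
    (l.drop M).getD j 0 = l.getD (M + j) 0 := by
  rw [List.getD_eq_getElem?_getD, List.getD_eq_getElem?_getD, List.getElem?_drop]

-- min(box) of a descending list is its last element; here box = l.take M.
lemma min_take_pairwise (l : List Int) (hp : l.Pairwise (fun a b => b ≤ a))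
    (M : Nat) (hM : 1 ≤ M) (hlen : M ≤ l.length) :
    ((PySem.List.min? (l.take M) (fun x => x)).getD 0) = l.getD (M - 1) 0 := by
  have htl : (l.take M).length = M := by simp [min_eq_left hlen]
  have hM1 : M - 1 < l.length := by omega
  cases hv : PySem.List.min? (l.take M) (fun x => x) with
  | none =>
      exfalso
      have h0 := (PySem.List.min?_eq_none_iff (l.take M) (fun x => x)).1 hv
      have := congrArg List.length h0
      rw [htl] at this
      simp at this
      omega
  | some v =>
      simp only [Option.getD_some]
      rw [List.getD_eq_getElem l 0 hM1]
      have hvmem := PySem.List.min?_mem hv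
      have hvmin := PySem.List.min?_isMin hv
      obtain ⟨j, hj, hjv⟩ := List.getElem_of_mem hvmem
      rw [htl] at hj
      have hjl : j < l.length := by omega
      have hjv' : l[j] = v := by rw [← hjv, List.getElem_take]
      have hx : l[M - 1]'hM1 ∈ l.take M := by
        have hgt : (l.take M)[M - 1]'(by rw [htl]; omega) = l[M - 1]'hM1 := List.getElem_take
        rw [← hgt]
        exact List.getElem_mem _
      refine le_antisymm (hvmin _ hx) ?_
      rcases lt_or_eq_of_le (by omega : j ≤ M - 1) with hlt | heq
      · have hpg := List.pairwise_iff_getElem.1 hp j (M - 1) hjl hM1 hlt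
        rw [hjv'] at hpg
        exact hpg
      · subst heq
        exact le_of_eq hjv'

-- Main loop invariant for m ≥ 1 over a descending list.
lemma solution_run (m : Int) (hm : 1 ≤ m) :
    ∀ (n : Nat) (l : List Int), l.length = n → l.Pairwise (fun a b => b ≤ a) →
    ∀ rlt : List Int,
    (if ((l.foldl (solutionStep m) ([], rlt)).1.length : Int) = m
      then solutionCal (l.foldl (solutionStep m) ([], rlt)).1 (l.foldl (solutionStep m) ([], rlt)).2
      else (l.foldl (solutionStep m) ([], rlt)).2).sum
    = rlt.sum + m * ((PySem.List.pyRange (m - 1) (l.length : Int) m).map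
        (fun i => PySem.List.pyGetD l i 0)).sum := by
  intro n
  induction n using Nat.strong_induction_on with
  | _ n ih =>
  intro l hlen hp rlt
  by_cases hsmall : (l.length : Int) < m
  · rw [solution_fill m l [] rlt (by simp; omega)]
    have hne : ((([] : List Int) ++ l).length : Int) ≠ m := by simp; omega
    rw [if_neg hne]
    rw [pyRange_pos_nil (m - 1) l.length m (by omega) (by omega)]
    simp
  · rw [not_lt] at hsmall
    set M := m.toNat with hMdef
    have hMm : (M : Int) = m := Int.toNat_of_nonneg (by omega)
    have hM1 : 1 ≤ M := by omega
    have hMle : M ≤ l.length := by omega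
    have htl : (l.take M).length = M := by simp [min_eq_left hMle]
    have hmin := min_take_pairwise l hp M hM1 hMle
    have hfold : l.foldl (solutionStep m) ([], rlt)
        = (l.drop M).foldl (solutionStep m) (l.take M, rlt) := by
      conv_lhs => rw [← List.take_append_drop M l]
      rw [List.foldl_append, solution_fill m (l.take M) [] rlt (by rw [htl]; simp; omega)]
      rw [List.nil_append]
    have hg : PySem.List.pyGetD l (m - 1) 0 = l.getD (M - 1) 0 := by
      rw [show (m - 1 : Int) = ((M - 1 : Nat) : Int) by omega, PySem.List.pyGetD_natCast]
    cases hd : l.drop M with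
    | nil =>
        have hld : (l.drop M).length = l.length - M := List.length_drop
        rw [hd] at hld
        have hlenM : l.length = M := by simp at hld; omega
        rw [hfold, hd]
        simp only [List.foldl_nil]
        rw [if_pos (by rw [htl, hMm])]
        unfold solutionCal
        rw [List.sum_append, hmin]
        rw [pyRange_pos_cons (m - 1) (l.length : Int) m (by omega) (by omega)]
        rw [pyRange_pos_nil (m - 1 + m) (l.length : Int) m (by omega) (by omega)]
        simp only [List.map_cons, List.map_nil, List.sum_cons, List.sum_nil]
        rw [hg, htl, hMm]
        simp
        ring
    | cons a rest =>
        have hld : (l.drop M).length = l.length - M := List.length_drop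
        rw [hd] at hld
        have hstep1 : (a :: rest).foldl (solutionStep m) (l.take M, rlt)
            = rest.foldl (solutionStep m) ([a], solutionCal (l.take M) rlt) := by
          simp only [List.foldl_cons, solutionStep]
          rw [if_pos (by rw [htl, hMm])]
        have hstep2 : rest.foldl (solutionStep m) ([a], solutionCal (l.take M) rlt)
            = (a :: rest).foldl (solutionStep m) ([], solutionCal (l.take M) rlt) := by
          simp only [List.foldl_cons, solutionStep]
          rw [if_neg (by simp; omega)]
          simp
        have hlrest : (a :: rest).length = n - M := by
          rw [hld, hlen]
        have hplt : (a :: rest).Pairwise (fun a b : Int => b ≤ a) := by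
          rw [← hd]
          exact List.Pairwise.sublist (List.drop_sublist M l) hp
        have hnlt : n - M < n := by omega
        have ihr := ih (n - M) hnlt (a :: rest) hlrest hplt (solutionCal (l.take M) rlt)
        rw [hfold, hd, hstep1, hstep2, ihr]
        have hsum' : (solutionCal (l.take M) rlt).sum = rlt.sum + m * l.getD (M - 1) 0 := by
          unfold solutionCal
          rw [List.sum_append, hmin, htl, hMm]
          simp
          ring
        have hcast : (((a :: rest).length : Nat) : Int) = (l.length : Int) - m := by
          rw [hlrest, hlen]
          omega
        rw [hcast]
        rw [pyRange_pos_cons (m - 1) (l.length : Int) m (by omega) (by omega)]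
        rw [pyRange_pos_shift (m - 1) (l.length : Int) m (by omega)]
        rw [List.map_cons, List.map_map, List.sum_cons]
        have hmap : ((PySem.List.pyRange (m - 1) ((l.length : Int) - m) m).map
              ((fun i => PySem.List.pyGetD l i 0) ∘ (· + m))).sum
            = ((PySem.List.pyRange (m - 1) ((l.length : Int) - m) m).map
              (fun i => PySem.List.pyGetD (a :: rest) i 0)).sum := by
          congr 1
          apply List.map_congr_left
          intro i hi
          have hi0 : 0 ≤ i := by
            have hmem := (PySem.List.mem_pyRange_iff_of_pos (by omega : (0 : Int) < m) i).1 hi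
            omega
          simp only [Function.comp_apply]
          rw [← hd]
          rw [show i + m = ((i.toNat + M : Nat) : Int) by omega,
            show i = ((i.toNat : Nat) : Int) by omega]
          rw [PySem.List.pyGetD_natCast, PySem.List.pyGetD_natCast]
          rw [getD_drop_zero, Nat.add_comm]
          have htn : ((i.toNat : Int)).toNat = i.toNat := by omega
          rw [htn]
        rw [hmap, hg, hsum']
        ring

-- ===== VERDICT (by name: the statement is the Claim_ definition above) =====
theorem solution_spec : Claim_equal_solution := by
  intro k m score _ hpre
  unfold Spec_solution solution solution_alt
  set s := PySem.List.sorted score (fun x => x) true with hs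
  by_cases hneg : m ≤ 0
  · have hm : m < 0 := lt_of_le_of_ne hneg hpre
    simp only [if_pos hneg]
    rw [solution_negfill m hm s [] []]
    have hne : ((s.length : Nat) : Int) ≠ m := by omega
    simp [hne]
  · have hm : 1 ≤ m := by omega
    have hp : s.Pairwise (fun a b : Int => b ≤ a) :=
      PySem.List.sorted_pairwise_rev score (fun x => x)
    simp only [if_neg hneg]
    have h := solution_run m hm s.length s rfl hp []
    simpa using h
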